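-- pv_equiv track=rewrite | github.com/Imad-Janbain/Automated-Historical-Database-Projection | src/deep_ts_imputer/eda/eda.py | _group_columns_by_station
-- ===== SOURCE A (Python) =====
-- def _group_columns_by_station(
--     columns: list[str],
--     stations: list[str],
-- ) -> dict[str, list[str]]:
--     """Group columns by which station name they contain.
--
--     Matching is case-insensitive substring. A column belongs to the
--     first station whose name appears in it.
--     """
--     out: dict[str, list[str]] = {s: [] for s in stations}
--     for col in columns:
--         lc = col.lower()
--         for s in stations:
--             if s.lower() in lc:
--                 out[s].append(col)
--                 break
--     return out
-- ===== SOURCE B (Python) =====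
-- def _group_columns_by_station(columns, stations):
--     """Station-major grouping: lowercase every column once, then let each
--     station (in order, skipping duplicates) claim and remove its matching
--     columns from the remaining pool."""
--     out = {}
--     remaining = [(c, c.lower()) for c in columns]
--     for s in stations:
--         if s in out:
--             continue
--         ls = s.lower()
--         out[s] = [c for c, lc in remaining if ls in lc]
--         remaining = [(c, lc) for c, lc in remaining if ls not in lc]
--     return out
-- ===== Notes on version B (the rewrite author's own statement) =====
-- stated objective: alternative
-- what changed: Column-major scan with an inner break over stations is replaced by a station-major partition: each column is lowercased once, and each station in turn claims its matching columns and removes them from the remaining pool (duplicate stations skipped).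
import Mathlib
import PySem

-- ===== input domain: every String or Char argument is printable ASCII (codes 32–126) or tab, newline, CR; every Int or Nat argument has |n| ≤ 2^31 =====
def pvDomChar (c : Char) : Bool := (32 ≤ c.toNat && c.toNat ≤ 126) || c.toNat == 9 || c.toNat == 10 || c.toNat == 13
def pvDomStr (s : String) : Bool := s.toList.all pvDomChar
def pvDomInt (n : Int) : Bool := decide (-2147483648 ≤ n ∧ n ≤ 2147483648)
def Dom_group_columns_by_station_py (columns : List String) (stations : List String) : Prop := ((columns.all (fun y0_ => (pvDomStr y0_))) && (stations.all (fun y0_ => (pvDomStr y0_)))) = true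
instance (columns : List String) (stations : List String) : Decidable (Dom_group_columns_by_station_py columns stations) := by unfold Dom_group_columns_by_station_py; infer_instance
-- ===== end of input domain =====

-- B replaces A's column-major scan (inner break over stations) by a station-major partition of a
-- once-lowercased column pool; same results, a genuinely different traversal (objective: alternative).

-- ===== PORT A =====
-- inner 'for s in stations: if s.lower() in lc: out[s].append(col); break'
def pvAInner (d : PySem.Dict String (List String)) (col : String) (lc : String) :
    List String → PySem.Dict String (List String)
  | [] => d
  | s :: rest =>
    if PySem.Str.isIn (PySem.Str.lower s) lc then d.modify s [] (fun v => v ++ [col])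
    else pvAInner d col lc rest

def group_columns_by_station_py (columns : List String) (stations : List String) :
    List (String × List String) :=
  let out := stations.foldl (fun d s => d.insert s ([] : List String)) PySem.Dict.empty
  let out := columns.foldl (fun d col => pvAInner d col (PySem.Str.lower col) stations) out
  out.items

-- ===== PORT B =====
-- 'for s in stations: if s in out: continue; out[s] = matches; remaining = rest'
def pvAltGo : List String → List (String × String) → PySem.Dict String (List String) →
    PySem.Dict String (List String)
  | [], _, out => out
  | s :: rest, remaining, out =>
    if out.contains s then pvAltGo rest remaining out
    else
      let ls := PySem.Str.lower s
      pvAltGo rest (remaining.filter (fun p => !PySem.Str.isIn ls p.2))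
        (out.insert s ((remaining.filter (fun p => PySem.Str.isIn ls p.2)).map (fun p => p.1)))

def group_columns_by_station_py_alt (columns : List String) (stations : List String) :
    List (String × List String) :=
  (pvAltGo stations (columns.map (fun c => (c, PySem.Str.lower c))) PySem.Dict.empty).items

-- ===== PRECONDITION & SPEC =====
def Spec_group_columns_by_station_py (columns : List String) (stations : List String) (out : List (String × List String)) : Prop := out = group_columns_by_station_py_alt columns stations
instance (columns : List String) (stations : List String) (out : List (String × List String)) : Decidable (Spec_group_columns_by_station_py columns stations out) := by unfold Spec_group_columns_by_station_py; infer_instance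

-- ===== CLAIM (what is proved, stated in full; the proofs are below) =====
def Claim_equal_group_columns_by_station_py : Prop := ∀ (columns : List String) (stations : List String), Dom_group_columns_by_station_py columns stations → Spec_group_columns_by_station_py columns stations (group_columns_by_station_py columns stations)

-- ===== LEMMAS AND PROOFS =====

-- does station s (case-insensitively) occur in the lowered column lc?
def pvMatch (lc s : String) : Bool := PySem.Str.isIn (PySem.Str.lower s) lc

-- first station of sts matching the lowered column lc (A's inner loop / B's claiming order)
def pvFindM (sts : List String) (lc : String) : Option String := sts.find? (pvMatch lc)

-- keys B will add when stations 'sts' are processed after 'done': first occurrences not in done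
def pvNewKeys : List String → List String → List String
  | _, [] => []
  | done, s :: rest => if s ∈ done then pvNewKeys done rest else s :: pvNewKeys (done ++ [s]) rest

theorem pvAInner_eq (sts : List String) (d : PySem.Dict String (List String)) (col lc : String) :
    pvAInner d col lc sts =
      match pvFindM sts lc with
      | none => d
      | some s => d.modify s [] (fun v => v ++ [col]) := by
  induction sts with
  | nil => rfl
  | cons s rest ih =>
    rw [pvAInner]
    by_cases h : PySem.Str.isIn (PySem.Str.lower s) lc = true
    · rw [if_pos h]
      have hm : pvMatch lc s = true := h
      simp [pvFindM, hm]
    · rw [if_neg h, ih]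
      have hm : pvMatch lc s = false := by unfold pvMatch; simpa using h
      simp [pvFindM, hm]

theorem pvA_loop_eq (columns : List String) (stations : List String)
    (d : PySem.Dict String (List String)) :
    columns.foldl (fun d col => pvAInner d col (PySem.Str.lower col) stations) d =
      (columns.filterMap (fun c => (pvFindM stations (PySem.Str.lower c)).map (fun s => (s, c)))).foldl
        (fun d p => d.modify p.1 [] (fun v => v ++ [p.2])) d := by
  induction columns generalizing d with
  | nil => rfl
  | cons c rest ih =>
    simp only [List.foldl_cons, List.filterMap_cons]
    cases h : pvFindM stations (PySem.Str.lower c) with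
    | none => rw [pvAInner_eq, h]; exact ih d
    | some s => rw [pvAInner_eq, h]; simp [ih]

theorem pvA_getD_init (sts : List String) (d : PySem.Dict String (List String)) (s : String)
    (h : d.getD s [] = []) :
    (sts.foldl (fun d s' => d.insert s' ([] : List String)) d).getD s [] = [] := by
  induction sts generalizing d with
  | nil => exact h
  | cons t rest ih =>
    simp only [List.foldl_cons]
    exact ih _ (by rw [PySem.Dict.getD_insert]; split_ifs <;> simp [h])

theorem pv_filterMap_key (stations : List String) (s : String) (columns : List String) :
    ((columns.filterMap (fun c => (pvFindM stations (PySem.Str.lower c)).map (fun s' => (s', c)))).filter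
        (fun p => p.1 == s)).map (fun p => p.2) =
      columns.filter (fun c => pvFindM stations (PySem.Str.lower c) == some s) := by
  induction columns with
  | nil => rfl
  | cons c rest ih =>
    simp only [List.filterMap_cons, List.filter_cons]
    cases h : pvFindM stations (PySem.Str.lower c) with
    | none => simpa [h] using ih
    | some t =>
      by_cases ht : t = s
      · simp [ht, ih]
      · simp [ht, ih]

theorem pv_update_absorb (l : List String) (s : PySem.Set String) (h : ∀ x ∈ l, x ∈ s) :
    PySem.Set.update s l = s := by
  induction l generalizing s with
  | nil => rfl
  | cons x rest ih =>
    have hx : x ∈ s := h x (by simp)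
    have : PySem.Set.add s x = s := by simp [PySem.Set.add, PySem.Set.contains, hx]
    simp only [PySem.Set.update, List.foldl_cons] at *
    rw [this]
    exact ih s (fun y hy => h y (by simp [hy]))

theorem pv_update_newKeys (sts done : List String) :
    PySem.Set.update done sts = done ++ pvNewKeys done sts := by
  induction sts generalizing done with
  | nil => simp [PySem.Set.update, pvNewKeys]
  | cons s rest ih =>
    simp only [PySem.Set.update, List.foldl_cons] at *
    by_cases h : s ∈ done
    · have : PySem.Set.add done s = done := by simp [PySem.Set.add, PySem.Set.contains, h]
      rw [this, ih, pvNewKeys, if_pos h]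
    · have : PySem.Set.add done s = done ++ [s] := by simp [PySem.Set.add, PySem.Set.contains, h]
      rw [this, ih, pvNewKeys, if_neg h]
      simp

theorem pv_find_middle (p : String → Bool) (a : String) (l1 l2 : List String) (h : a ∈ l1) :
    (l1 ++ a :: l2).find? p = (l1 ++ l2).find? p := by
  rw [List.find?_append, List.find?_append]
  cases h1 : l1.find? p with
  | some x => rfl
  | none =>
    have : p a = false := by
      have := List.find?_eq_none.mp h1 a h
      simpa using this
    simp [this]

theorem pv_head_match (done rest : List String) (s : String) (hs : s ∉ done) (lc : String) :
    (pvFindM (done ++ s :: rest) lc == some s) =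
      ((pvFindM done lc).isNone && pvMatch lc s) := by
  unfold pvFindM
  rw [List.find?_append]
  cases h1 : done.find? (pvMatch lc) with
  | some x =>
    have hx : x ∈ done := List.mem_of_find?_eq_some h1
    have : x ≠ s := fun he => hs (he ▸ hx)
    simp [Option.or, this]
  | none =>
    by_cases hm : pvMatch lc s = true
    · simp [Option.or, hm]
    · rw [Option.none_or, List.find?_cons_of_neg (by simp [hm])]
      have hmf : pvMatch lc s = false := by simpa using hm
      cases h2 : rest.find? (pvMatch lc) with
      | none => simp [hmf]
      | some y =>
        have hy : pvMatch lc y = true := List.find?_some h2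
        have hne : y ≠ s := fun he => hm (he ▸ hy)
        simp [hne, hmf]

theorem pv_ext_none (done : List String) (s : String) (lc : String) :
    (pvFindM (done ++ [s]) lc).isNone =
      ((pvFindM done lc).isNone && !pvMatch lc s) := by
  unfold pvFindM
  rw [List.find?_append]
  cases h1 : done.find? (pvMatch lc) with
  | some x => simp [Option.or]
  | none =>
    by_cases hm : pvMatch lc s = true
    · simp [Option.or, hm]
    · rw [Option.none_or, List.find?_cons_of_neg (by simp [hm])]
      simp [hm]

theorem pvB_main (sts : List String) (columns : List String) (done : List String)
    (out : PySem.Dict String (List String))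
    (hcont : ∀ s, out.contains s = decide (s ∈ done)) :
    (pvAltGo sts
        ((columns.filter (fun c => (pvFindM done (PySem.Str.lower c)).isNone)).map
          (fun c => (c, PySem.Str.lower c))) out).items =
      out.items ++ (pvNewKeys done sts).map
        (fun s => (s, columns.filter (fun c => pvFindM (done ++ sts) (PySem.Str.lower c) == some s))) := by
  induction sts generalizing done out with
  | nil => simp [pvAltGo, pvNewKeys]
  | cons s rest ih =>
    by_cases hs : s ∈ done
    · have hc : out.contains s = true := by rw [hcont]; simpa using hs
      rw [pvAltGo, if_pos hc]
      have hfm : pvFindM (done ++ s :: rest) = pvFindM (done ++ rest) :=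
        funext fun lc => pv_find_middle (pvMatch lc) s done rest hs
      rw [show pvNewKeys done (s :: rest) = pvNewKeys done rest from by rw [pvNewKeys, if_pos hs]]
      simp only [hfm]
      exact ih done out hcont
    · have hc : out.contains s = false := by rw [hcont]; simpa using hs
      rw [pvAltGo, if_neg (by simp [hc])]
      -- rewrite matched and the new remaining pool into canonical filtered form
      simp only [List.filter_map, List.map_map, List.filter_filter, Function.comp_def]
      have hm1 : (fun a => PySem.Str.isIn (PySem.Str.lower s) (PySem.Str.lower a) &&
          (pvFindM done (PySem.Str.lower a)).isNone) =
          (fun c => pvFindM (done ++ s :: rest) (PySem.Str.lower c) == some s) := by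
        funext c
        rw [pv_head_match done rest s hs, Bool.and_comm]
        rfl
      have hm2 : (fun a => !PySem.Str.isIn (PySem.Str.lower s) (PySem.Str.lower a) &&
          (pvFindM done (PySem.Str.lower a)).isNone) =
          (fun c => (pvFindM (done ++ [s]) (PySem.Str.lower c)).isNone) := by
        funext c
        rw [pv_ext_none done s, Bool.and_comm]
        rfl
      rw [hm1, hm2, List.map_id']
      have hcont' : ∀ s', (out.insert s
          (columns.filter (fun c => pvFindM (done ++ s :: rest) (PySem.Str.lower c) == some s))).contains s'
          = decide (s' ∈ done ++ [s]) := by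
        intro s'
        rw [PySem.Dict.contains_insert, hcont]
        by_cases h1 : s' = s <;> by_cases h2 : s' ∈ done <;> simp [h1, h2]
      rw [ih (done ++ [s]) _ hcont']
      rw [PySem.Dict.items_insert_of_not_contains _ _ (h := hc)]
      rw [show pvNewKeys done (s :: rest) = s :: pvNewKeys (done ++ [s]) rest from by
        rw [pvNewKeys, if_neg hs]]
      simp [List.append_assoc]

-- characterization of A's result
theorem pvA_items (columns stations : List String) :
    group_columns_by_station_py columns stations =
      (PySem.Set.ofList stations).map
        (fun s => (s, columns.filter (fun c => pvFindM stations (PySem.Str.lower c) == some s))) := by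
  unfold group_columns_by_station_py
  show (List.foldl (fun d col => pvAInner d col (PySem.Str.lower col) stations)
      (stations.foldl (fun d s => d.insert s ([] : List String)) PySem.Dict.empty) columns).items = _
  set d0 := stations.foldl (fun d s => d.insert s ([] : List String)) PySem.Dict.empty with hd0
  rw [pvA_loop_eq]
  set ml := columns.filterMap (fun c => (pvFindM stations (PySem.Str.lower c)).map (fun s => (s, c)))
    with hml
  set D := ml.foldl (fun d p => d.modify p.1 [] (fun v => v ++ [p.2])) d0 with hD
  have hk0 : d0.keys = PySem.Set.ofList stations := by
    rw [hd0, PySem.Dict.keys_foldl_insert]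
    simp [PySem.Set.ofList_eq_foldl, PySem.Set.update]
  have hkeys : D.keys = PySem.Set.ofList stations := by
    rw [hD, PySem.Dict.keys_foldl_modify_key ml (fun p => p.1) _ _ d0, hk0]
    apply pv_update_absorb
    intro x hx
    simp only [hml, List.mem_map, List.mem_filterMap] at hx
    obtain ⟨p, hp, hpx⟩ := hx
    obtain ⟨c, _, hc⟩ := hp
    cases h : pvFindM stations (PySem.Str.lower c) with
    | none => rw [h] at hc; simp at hc
    | some t =>
      rw [h] at hc; simp at hc
      have ht : t ∈ stations := List.mem_of_find?_eq_some h
      cases hc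
      rw [← hpx]
      simpa [PySem.Set.mem_ofList] using ht
  have hnd : D.keys.Nodup := by
    rw [hD]
    exact PySem.Dict.nodup_keys_foldl_modify_key ml (fun p => p.1) _ _ d0
      (by rw [hd0]; exact PySem.Dict.nodup_keys_foldl_insert _ _ _ PySem.Dict.nodup_keys_empty)
  have hget : ∀ s, D.getD s [] =
      columns.filter (fun c => pvFindM stations (PySem.Str.lower c) == some s) := by
    intro s
    rw [hD, PySem.Dict.getD_foldl_modify_append]
    rw [show d0.getD s [] = [] from pvA_getD_init stations PySem.Dict.empty s (by simp)]
    rw [List.nil_append, hml]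
    exact pv_filterMap_key stations s columns
  rw [PySem.Dict.items_eq_map_keys D hnd [], hkeys]
  exact List.map_congr_left fun s _ => by rw [hget s]

-- ===== VERDICT (by name: the statement is the Claim_ definition above) =====
theorem group_columns_by_station_py_spec : Claim_equal_group_columns_by_station_py := by
  intro columns stations _
  unfold Spec_group_columns_by_station_py group_columns_by_station_py_alt
  rw [pvA_items]
  have h0 : (columns.filter (fun c => (pvFindM [] (PySem.Str.lower c)).isNone)).map
      (fun c => (c, PySem.Str.lower c)) = columns.map (fun c => (c, PySem.Str.lower c)) := by
    simp [pvFindM]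
  rw [← h0, pvB_main stations columns [] PySem.Dict.empty (by simp)]
  rw [show PySem.Dict.empty.items = ([] : List (String × List String)) from rfl]
  have : PySem.Set.ofList stations = pvNewKeys [] stations := by
    have := pv_update_newKeys stations []
    simpa [PySem.Set.ofList_eq_foldl, PySem.Set.update] using this
  simp [this]
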